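-- pv_equiv track=rewrite | github.com/stackwalnuts/walnut | plugins/alive/scripts/alive-p2p.py | _should_exclude_package
-- ===== SOURCE A (Python) =====
-- _PACKAGE_EXCLUDES = {
--     "_kernel/now.json",
--     "_kernel/_generated",
--     "_kernel/history",
--     "_kernel/links.yaml",
--     "_kernel/people.yaml",
--     "_kernel/imports.json",
--     ".alive/_squirrels",
--     "desktop.ini",
-- }
--
-- _PACKAGE_EXCLUDE_NAMES = {
--     ".DS_Store",
--     "Thumbs.db",
--     "desktop.ini",
-- }
--
-- def _should_exclude_package(rel_path):
--     # type: (str) -> bool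
--     """Return True if a POSIX relpath matches the system exclude list.
--
--     Only the hardcoded system excludes from ``_PACKAGE_EXCLUDES`` /
--     ``_PACKAGE_EXCLUDE_NAMES`` are applied here. User-supplied ``--exclude``
--     glob patterns and preset exclusions live in LD11's create CLI contract and
--     are applied by the CLI layer (task .5 / .7), after this helper returns
--     False.
--     """
--     if not rel_path:
--         return False
--     rel = rel_path.replace("\\", "/")
--
--     # Exact path prefix matches (covers both files and dir prefixes).
--     for pattern in _PACKAGE_EXCLUDES:
--         if rel == pattern or rel.startswith(pattern + "/"):
--             return True
--
--     # Name-only filter. Applies to any segment of the relpath, not just the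
--     # leaf -- ``.DS_Store`` buried inside a bundle should still be excluded.
--     parts = rel.split("/")
--     for segment in parts:
--         if segment in _PACKAGE_EXCLUDE_NAMES:
--             return True
--         if segment.startswith("._"):
--             return True
--     return False
-- ===== SOURCE B (Python) =====
-- _PACKAGE_EXCLUDES = {
--     "_kernel/now.json",
--     "_kernel/_generated",
--     "_kernel/history",
--     "_kernel/links.yaml",
--     "_kernel/people.yaml",
--     "_kernel/imports.json",
--     ".alive/_squirrels",
--     "desktop.ini",
-- }
--
-- _PACKAGE_EXCLUDE_NAMES = {
--     ".DS_Store",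
--     "Thumbs.db",
--     "desktop.ini",
-- }
--
--
-- def _should_exclude_package(rel_path):
--     # type: (str) -> bool
--     if not rel_path:
--         return False
--     parts = rel_path.replace("\\", "/").split("/")
--     # Walk the path's own ancestor prefixes and look each up in the exclude
--     # set, instead of scanning the pattern set with startswith.
--     if any("/".join(parts[:i]) in _PACKAGE_EXCLUDES for i in range(1, len(parts) + 1)):
--         return True
--     return any(s in _PACKAGE_EXCLUDE_NAMES or s.startswith("._") for s in parts)
-- ===== Notes on version B (the rewrite author's own statement) =====
-- stated objective: idiomatic
-- what changed: Instead of scanning the pattern set with string startswith tests, B splits the path once and looks up each cumulative slash-boundary ancestor prefix of the path in the exclude set, reusing the same parts list for the segment-name check.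
import Mathlib
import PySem

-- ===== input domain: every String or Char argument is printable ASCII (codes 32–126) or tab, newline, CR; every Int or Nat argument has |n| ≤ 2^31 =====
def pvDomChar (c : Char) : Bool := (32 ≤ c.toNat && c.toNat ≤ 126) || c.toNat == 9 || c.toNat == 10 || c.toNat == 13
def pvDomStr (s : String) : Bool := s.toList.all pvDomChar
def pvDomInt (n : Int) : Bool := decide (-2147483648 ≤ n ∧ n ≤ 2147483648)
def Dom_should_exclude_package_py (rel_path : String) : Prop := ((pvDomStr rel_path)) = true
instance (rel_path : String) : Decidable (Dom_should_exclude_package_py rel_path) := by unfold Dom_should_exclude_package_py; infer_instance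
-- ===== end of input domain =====

-- B replaces A's scan of the pattern set with startswith tests by a single split of the
-- path and a set lookup of each cumulative slash-boundary ancestor prefix (idiomatic).

-- ===== PORT A =====
-- module constant _PACKAGE_EXCLUDES (a set literal; held as its distinct elements)
def pvExcludes : List (List Char) :=
  ["_kernel/now.json".toList, "_kernel/_generated".toList, "_kernel/history".toList,
   "_kernel/links.yaml".toList, "_kernel/people.yaml".toList, "_kernel/imports.json".toList,
   ".alive/_squirrels".toList, "desktop.ini".toList]

-- module constant _PACKAGE_EXCLUDE_NAMES
def pvExcludeNames : List (List Char) :=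
  [".DS_Store".toList, "Thumbs.db".toList, "desktop.ini".toList]

def should_exclude_package_py (rel_path : String) : Bool :=
  if rel_path.toList.isEmpty then false
  else
    let rel := PySem.Chars.replace rel_path.toList ['\\'] ['/']
    -- for pattern in _PACKAGE_EXCLUDES: if rel == pattern or rel.startswith(pattern + "/")
    if pvExcludes.any (fun pattern => rel == pattern || PySem.Chars.startswith rel (pattern ++ ['/'])) then
      true
    else
      -- parts = rel.split("/"); for segment in parts: …
      let parts := PySem.Chars.splitOn rel ['/']
      parts.any (fun segment =>
        pvExcludeNames.contains segment || PySem.Chars.startswith segment ['.', '_'])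

-- ===== PORT B =====
def should_exclude_package_py_alt (rel_path : String) : Bool :=
  if rel_path.toList.isEmpty then false
  else
    let parts := PySem.Chars.splitOn (PySem.Chars.replace rel_path.toList ['\\'] ['/']) ['/']
    -- any("/".join(parts[:i]) in _PACKAGE_EXCLUDES for i in range(1, len(parts) + 1))
    if (PySem.List.pyRange 1 (PySem.List.len parts + 1) 1).any (fun i =>
        pvExcludes.contains (PySem.Chars.join ['/'] (PySem.List.slice parts none (some i)))) then
      true
    else
      -- any(s in _PACKAGE_EXCLUDE_NAMES or s.startswith("._") for s in parts)
      parts.any (fun s => pvExcludeNames.contains s || PySem.Chars.startswith s ['.', '_'])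

-- ===== PRECONDITION & SPEC =====
def Spec_should_exclude_package_py (rel_path : String) (out : Bool) : Prop := out = should_exclude_package_py_alt rel_path
instance (rel_path : String) (out : Bool) : Decidable (Spec_should_exclude_package_py rel_path out) := by unfold Spec_should_exclude_package_py; infer_instance

-- ===== CLAIM (what is proved, stated in full; the proofs are below) =====
def Claim_equal_should_exclude_package_py : Prop := ∀ (rel_path : String), Dom_should_exclude_package_py rel_path → Spec_should_exclude_package_py rel_path (should_exclude_package_py rel_path)

-- ===== LEMMAS AND PROOFS =====

-- reference recursion for splitting on '/'
def pvSplit : List Char → List (List Char)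
  | [] => [[]]
  | c :: rest => if c = '/' then [] :: pvSplit rest else (pvSplit rest).modifyHead (c :: ·)

lemma pvSplit_ne_nil (s : List Char) : pvSplit s ≠ [] := by
  induction s with
  | nil => simp [pvSplit]
  | cons c rest ih =>
    simp only [pvSplit]
    split_ifs
    · simp
    · cases h : pvSplit rest with
      | nil => exact absurd h ih
      | cons a l => simp

lemma modifyHead_modifyHead {α : Type} (f g : α → α) (l : List α) :
    (l.modifyHead g).modifyHead f = l.modifyHead (fun x => f (g x)) := by
  cases l <;> simp

lemma pvSplit_go (fuel : Nat) (l cur : List Char) (acc : List (List Char))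
    (h : l.length < fuel) :
    PySem.Chars.splitOn.go ['/'] fuel l cur acc
      = acc.reverse ++ (pvSplit l).modifyHead (cur.reverse ++ ·) := by
  induction fuel generalizing l cur acc with
  | zero => omega
  | succ fuel ih =>
    cases l with
    | nil =>
      simp [PySem.Chars.splitOn.go, pvSplit]
    | cons c rest =>
      by_cases hc : c = '/'
      · subst hc
        have : (['/'] : List Char).isPrefixOf ('/' :: rest) = true := by
          simp [List.isPrefixOf]
        rw [PySem.Chars.splitOn.go]
        simp only [this, if_pos, List.length_singleton, List.drop_succ_cons, List.drop_zero]
        rw [ih rest [] (cur.reverse :: acc) (by simpa using Nat.lt_of_succ_lt_succ h)]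
        cases hsr : pvSplit rest with
        | nil => exact absurd hsr (pvSplit_ne_nil rest)
        | cons a l => simp [pvSplit, hsr]
      · have : (['/'] : List Char).isPrefixOf (c :: rest) = false := by
          simp [List.isPrefixOf]
          exact fun hh => absurd hh.symm hc
        rw [PySem.Chars.splitOn.go]
        simp only [this, Bool.false_eq_true, if_neg, not_false_iff]
        rw [ih rest (c :: cur) acc (by simpa using Nat.lt_of_succ_lt_succ h)]
        simp only [pvSplit, hc, if_neg, not_false_iff, modifyHead_modifyHead]
        simp

lemma splitOn_eq_pvSplit (s : List Char) :
    PySem.Chars.splitOn s ['/'] = pvSplit s := by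
  unfold PySem.Chars.splitOn
  rw [pvSplit_go s.length.succ s [] [] (Nat.lt_succ_self _)]
  cases h : pvSplit s <;> simp

lemma join_pvSplit (s : List Char) :
    PySem.Chars.join ['/'] (pvSplit s) = s := by
  induction s with
  | nil => simp [pvSplit, PySem.Chars.join_singleton]
  | cons c rest ih =>
    simp only [pvSplit]
    split_ifs with hc
    · subst hc
      cases h : pvSplit rest with
      | nil => exact absurd h (pvSplit_ne_nil rest)
      | cons a l =>
        rw [PySem.Chars.join_cons_cons]
        rw [← h, ih]
        simp
    · cases h : pvSplit rest with
      | nil => exact absurd h (pvSplit_ne_nil rest)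
      | cons a l =>
        cases l with
        | nil =>
          simp only [List.modifyHead]
          rw [PySem.Chars.join_singleton]
          have := ih; rw [h, PySem.Chars.join_singleton] at this
          simp [this]
        | cons b l' =>
          simp only [List.modifyHead]
          rw [PySem.Chars.join_cons_cons]
          have := ih; rw [h, PySem.Chars.join_cons_cons] at this
          simp [← this]

lemma pvSplit_append (a b : List Char) :
    pvSplit (a ++ '/' :: b) = pvSplit a ++ pvSplit b := by
  induction a with
  | nil => simp [pvSplit]
  | cons c rest ih =>
    simp only [List.cons_append, pvSplit, ih]
    split_ifs
    · rfl
    · cases h : pvSplit rest with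
      | nil => exact absurd h (pvSplit_ne_nil rest)
      | cons x l => simp [List.modifyHead]

lemma join_append (xs ys : List (List Char)) (hx : xs ≠ []) (hy : ys ≠ []) :
    PySem.Chars.join ['/'] (xs ++ ys)
      = PySem.Chars.join ['/'] xs ++ '/' :: PySem.Chars.join ['/'] ys := by
  induction xs with
  | nil => exact absurd rfl hx
  | cons x xs ih =>
    cases xs with
    | nil =>
      cases ys with
      | nil => exact absurd rfl hy
      | cons y ys =>
        rw [List.singleton_append, PySem.Chars.join_cons_cons, PySem.Chars.join_singleton]
        simp
    | cons x' xs' =>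
      have ihh := ih (by simp)
      simp only [List.cons_append] at ihh ⊢
      rw [PySem.Chars.join_cons_cons, ihh, PySem.Chars.join_cons_cons]
      simp

-- the heart: A's pattern-set scan equals B's ancestor-prefix lookups
lemma prefix_scan_eq (rel : List Char) :
    (pvExcludes.any (fun pattern => rel == pattern || PySem.Chars.startswith rel (pattern ++ ['/'])))
      = ((PySem.List.pyRange 1 (PySem.List.len (PySem.Chars.splitOn rel ['/']) + 1) 1).any (fun i =>
          pvExcludes.contains (PySem.Chars.join ['/'] (PySem.List.slice (PySem.Chars.splitOn rel ['/']) none (some i))))) := by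
  rw [splitOn_eq_pvSplit]
  set parts := pvSplit rel with hparts
  have hne : parts ≠ [] := pvSplit_ne_nil rel
  have hjoin : PySem.Chars.join ['/'] parts = rel := join_pvSplit rel
  have hlen : (1 : Int) ≤ parts.length := by
    have := List.length_pos_iff.mpr hne; omega
  apply Bool.eq_iff_iff.mpr
  simp only [List.any_eq_true, PySem.List.len_eq, Bool.or_eq_true, beq_iff_eq,
    PySem.Chars.startswith_iff, List.contains_eq_mem, decide_eq_true_eq,
    PySem.List.mem_pyRange_one]
  constructor
  · rintro ⟨p, hp, hcase⟩
    rcases hcase with hrel | ⟨tail, htail⟩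
    · -- rel == p : take all parts
      refine ⟨(parts.length : Int), ⟨hlen, by omega⟩, ?_⟩
      rw [PySem.List.slice_to_natCast]
      rw [List.take_length, hjoin, hrel]; exact hp
    · -- rel = p ++ '/' :: tail
      have hsplit : parts = pvSplit p ++ pvSplit tail := by
        rw [hparts, ← htail, List.append_assoc, List.singleton_append]
        exact pvSplit_append p tail
      refine ⟨((pvSplit p).length : Int), ?_, ?_⟩
      · constructor
        · exact_mod_cast List.length_pos_iff.mpr (pvSplit_ne_nil p)
        · have h1 : 0 < (pvSplit tail).length := List.length_pos_iff.mpr (pvSplit_ne_nil tail)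
          have h2 : parts.length = (pvSplit p).length + (pvSplit tail).length := by
            rw [hsplit]; simp
          omega
      · rw [PySem.List.slice_to_natCast]
        rw [hsplit, List.take_left, join_pvSplit]; exact hp
  · rintro ⟨i, ⟨h1, h2⟩, hmem⟩
    obtain ⟨k, rfl⟩ := Int.eq_ofNat_of_zero_le (by omega : (0:Int) ≤ i)
    rw [PySem.List.slice_to_natCast] at hmem
    have hk1 : 1 ≤ k := by exact_mod_cast h1
    have hk2 : k ≤ parts.length := by
      have : (k : Int) < parts.length + 1 := h2
      omega
    refine ⟨PySem.Chars.join ['/'] (parts.take k), hmem, ?_⟩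
    by_cases hi : k = parts.length
    · left
      rw [hi, List.take_length, hjoin]
    · right
      have hilt : k < parts.length := by omega
      have hdecomp : parts = parts.take k ++ parts.drop k := (List.take_append_drop _ _).symm
      have htne : parts.take k ≠ [] := by
        intro hco
        rw [List.take_eq_nil_iff] at hco
        rcases hco with h | h
        · omega
        · exact hne h
      have hdne : parts.drop k ≠ [] := by
        intro hco
        rw [List.drop_eq_nil_iff] at hco
        omega
      refine ⟨PySem.Chars.join ['/'] (parts.drop k), ?_⟩
      have hrel2 : rel = PySem.Chars.join ['/'] (parts.take k)
          ++ '/' :: PySem.Chars.join ['/'] (parts.drop k) := by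
        calc rel = PySem.Chars.join ['/'] parts := hjoin.symm
          _ = PySem.Chars.join ['/'] (parts.take k ++ parts.drop k) := by
              rw [← hdecomp]
          _ = _ := join_append _ _ htne hdne
      rw [List.append_assoc, List.singleton_append]
      exact hrel2.symm

-- ===== VERDICT (by name: the statement is the Claim_ definition above) =====
theorem should_exclude_package_py_spec : Claim_equal_should_exclude_package_py := by
  intro rel_path _
  unfold Spec_should_exclude_package_py
  unfold should_exclude_package_py should_exclude_package_py_alt
  by_cases h : rel_path.toList.isEmpty
  · simp [h]
  · simp only [h, Bool.false_eq_true, if_neg, not_false_iff]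
    rw [prefix_scan_eq]
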